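-- pv_equiv track=rewrite | github.com/pgosar/Algorithms | binarySearch/random/hard/partitionString.py | solve
-- ===== SOURCE A (Python) =====
-- def solve(s):
--     ans = []
--     left = right = 0
--     lastIndex = {c: i for i, c in enumerate(s)}
--
--     for i, c in enumerate(s):
--         right = max(right, lastIndex[c])
--         if i == right:
--             ans.append(right - left + 1)
--             left = right = i + 1
--
--     return ans
-- ===== SOURCE B (Python) =====
-- def solve(s):
--     # Count occurrences, then sweep once keeping the set of characters of the
--     # current segment that still occur later; cut when that set drains empty.
--     remaining = {}
--     for c in s:
--         remaining[c] = remaining.get(c, 0) + 1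
--     ans = []
--     pending = set()
--     size = 0
--     for c in s:
--         remaining[c] -= 1
--         if remaining[c] > 0:
--             pending.add(c)
--         else:
--             pending.discard(c)
--         size += 1
--         if not pending:
--             ans.append(size)
--             size = 0
--     return ans
-- ===== Notes on version B (the rewrite author's own statement) =====
-- stated objective: alternative
-- what changed: A precomputes each character's last occurrence index and cuts where the running maximum of those indices equals the current position; B instead precomputes occurrence counts and maintains the set of current-segment characters that still occur later, cutting when that set drains empty.
import Mathlib
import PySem

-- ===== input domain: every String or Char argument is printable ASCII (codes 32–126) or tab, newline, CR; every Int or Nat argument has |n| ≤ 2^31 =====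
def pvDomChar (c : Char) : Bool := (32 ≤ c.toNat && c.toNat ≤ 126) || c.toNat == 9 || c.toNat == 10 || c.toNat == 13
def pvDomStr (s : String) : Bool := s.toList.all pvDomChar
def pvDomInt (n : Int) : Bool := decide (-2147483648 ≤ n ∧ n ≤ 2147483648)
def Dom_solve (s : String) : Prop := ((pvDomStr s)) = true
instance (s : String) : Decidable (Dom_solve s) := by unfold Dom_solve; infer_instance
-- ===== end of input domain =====

-- B replaces A's precomputed last-occurrence-index dict and running maximum by an
-- occurrence counter and a set of still-pending segment characters (alternative
-- bookkeeping, same single pass; no speed claim).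

-- ===== PORT A =====
-- lastIndex = {c: i for i, c in enumerate(s)}
def lastDict (l : List Char) : PySem.Dict Char Int :=
  (PySem.List.enumerate l).foldl (fun d p => d.insert p.2 p.1) PySem.Dict.empty

-- one iteration of A's loop; state = (ans, left, right)
-- lastIndex[c] ported as getD _ 0: exact, the key is always present (c comes from s)
def stepA (d : PySem.Dict Char Int) (st : List Int × Int × Int) (p : Int × Char) :
    List Int × Int × Int :=
  let right := max st.2.2 (d.getD p.2 0)
  if p.1 = right then (st.1 ++ [right - st.2.1 + 1], p.1 + 1, p.1 + 1)
  else (st.1, st.2.1, right)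

def solve (s : String) : List Int :=
  let l := s.toList
  ((PySem.List.enumerate l).foldl (stepA (lastDict l)) ([], 0, 0)).1

-- ===== PORT B =====
-- remaining = {}; for c in s: remaining[c] = remaining.get(c, 0) + 1
def cntDict (l : List Char) : PySem.Dict Char Int :=
  l.foldl (fun d c => d.insert c (d.getD c 0 + 1)) PySem.Dict.empty

-- one iteration of B's loop; state = (remaining, pending, ans, size)
-- remaining[c] -= 1 ported as modify _ 0 (· - 1): exact, the key is always present
def stepB (st : PySem.Dict Char Int × PySem.Set Char × List Int × Int) (c : Char) :
    PySem.Dict Char Int × PySem.Set Char × List Int × Int :=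
  let rem := st.1.modify c 0 (· - 1)
  let pend := if rem.getD c 0 > 0 then PySem.Set.add st.2.1 c else PySem.Set.discard st.2.1 c
  let size := st.2.2.2 + 1
  if pend.isEmpty then (rem, pend, st.2.2.1 ++ [size], 0)
  else (rem, pend, st.2.2.1, size)

def solve_alt (s : String) : List Int :=
  let l := s.toList
  (l.foldl stepB (cntDict l, PySem.Set.empty, [], 0)).2.2.1

-- ===== PRECONDITION & SPEC =====
def Spec_solve (s : String) (out : List Int) : Prop := out = solve_alt s
instance (s : String) (out : List Int) : Decidable (Spec_solve s out) := by unfold Spec_solve; infer_instance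

-- ===== CLAIM (what is proved, stated in full; the proofs are below) =====
def Claim_equal_solve : Prop := ∀ (s : String), Dom_solve s → Spec_solve s (solve s)

-- ===== LEMMAS AND PROOFS =====

lemma lastDict_append (l : List Char) (x : Char) :
    lastDict (l ++ [x]) = (lastDict l).insert x (l.length : Int) := by
  unfold lastDict
  rw [PySem.List.enumerate_append]
  simp [PySem.List.enumerate_cons, PySem.List.enumerate_nil]

lemma lastDict_spec (l : List Char) (c : Char) (hc : c ∈ l) :
    ∃ j : Nat, j < l.length ∧ l[j]? = some c ∧
      (∀ k : Nat, k < l.length → l[k]? = some c → k ≤ j) ∧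
      (lastDict l).getD c 0 = (j : Int) := by
  induction l using List.reverseRecOn with
  | nil => simp at hc
  | append_singleton xs x ih =>
    rw [lastDict_append]
    by_cases hcx : c = x
    · subst hcx
      refine ⟨xs.length, by simp, by simp, ?_, by simp [PySem.Dict.getD_insert_self]⟩
      intro k hk _; simp at hk; omega
    · simp only [PySem.Dict.getD_insert, if_neg hcx]
      have hcxs : c ∈ xs := by
        rcases List.mem_append.1 hc with h | h
        · exact h
        · simp at h; exact absurd h hcx
      obtain ⟨j, hj, hget, hmax, hval⟩ := ih hcxs
      refine ⟨j, by simp; omega, ?_, ?_, hval⟩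
      · rw [List.getElem?_append_left hj]; exact hget
      · intro k hk hkc
        simp at hk
        rcases Nat.lt_or_ge k xs.length with h | h
        · exact hmax k h (by rwa [List.getElem?_append_left h] at hkc)
        · exfalso
          have : k = xs.length := by omega
          subst this
          rw [List.getElem?_append_right (le_refl _)] at hkc
          simp at hkc; exact hcx hkc.symm

lemma L_ge (l : List Char) (j : Nat) (c : Char) (hc : l[j]? = some c) :
    (j : Int) ≤ (lastDict l).getD c 0 := by
  have hjlt : j < l.length := (List.getElem?_eq_some_iff.1 hc).1
  have hmem : c ∈ l := by
    have := List.getElem?_eq_some_iff.1 hc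
    obtain ⟨h, he⟩ := this
    exact he ▸ List.getElem_mem h
  obtain ⟨j0, hj0, _, hmax, hval⟩ := lastDict_spec l c hmem
  rw [hval]
  exact_mod_cast hmax j hjlt hc

lemma L_bridge (l : List Char) (c : Char) (hc : c ∈ l) (i : Nat) :
    ((i : Int) < (lastDict l).getD c 0) ↔ 0 < (l.drop (i + 1)).count c := by
  obtain ⟨j, hj, hget, hmax, hval⟩ := lastDict_spec l c hc
  rw [hval, List.count_pos_iff]
  constructor
  · intro h
    have hij : i + 1 ≤ j := by exact_mod_cast h
    have hx : (l.drop (i+1))[j - (i+1)]? = some c := by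
      rw [List.getElem?_drop, Nat.add_sub_cancel' hij]; exact hget
    obtain ⟨hlt, he⟩ := List.getElem?_eq_some_iff.1 hx
    exact he ▸ List.getElem_mem hlt
  · intro h
    obtain ⟨k, hk, hkc⟩ := List.mem_iff_getElem.1 h
    rw [List.getElem_drop] at hkc
    have hklen : i + 1 + k < l.length := by
      have h2 : (List.drop (i+1) l).length = l.length - (i+1) := List.length_drop
      omega
    have := hmax (i + 1 + k) hklen (by rw [List.getElem?_eq_some_iff]; exact ⟨hklen, hkc⟩)
    have : i < j := by omega
    exact_mod_cast this

lemma main_inv (l : List Char) (rest : List Char) :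
    ∀ (m p : Nat) (ans : List Int) (right : Int)
      (rem : PySem.Dict Char Int) (pend : PySem.Set Char),
      l.drop m = rest → p ≤ m →
      (∀ i : Int, right ≤ i ↔ ((p : Int) ≤ i ∧
          ∀ c ∈ (l.take m).drop p, (lastDict l).getD c 0 ≤ i)) →
      (∀ c, rem.getD c 0 = (rest.count c : Int)) →
      (∀ c, c ∈ pend ↔ (c ∈ (l.take m).drop p ∧ 0 < rest.count c)) →
      ((PySem.List.enumerate rest (m : Int)).foldl (stepA (lastDict l)) (ans, (p : Int), right)).1
        = (rest.foldl stepB (rem, pend, ans, ((m - p : Nat) : Int))).2.2.1 := by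
  induction rest with
  | nil =>
    intro m p ans right rem pend _ _ _ _ _
    simp [PySem.List.enumerate_nil]
  | cons c rest' ih =>
    intro m p ans right rem pend hdrop hpm Hr Hrem Hpend
    have hlen : (l.drop m).length = l.length - m := List.length_drop
    rw [hdrop] at hlen
    have hm : m < l.length := by simp at hlen; omega
    have hgetm : l[m]? = some c := by
      have h0 : (l.drop m)[0]? = l[m + 0]? := List.getElem?_drop
      rw [hdrop] at h0; simpa using h0.symm
    have hdrop' : l.drop (m + 1) = rest' := by
      have h1 : (l.drop m).drop 1 = l.drop (m + 1) := List.drop_drop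
      rw [hdrop] at h1
      simpa using h1.symm
    have hLc : (m : Int) ≤ (lastDict l).getD c 0 := L_ge l m c hgetm
    have hslice : (l.take (m + 1)).drop p = ((l.take m).drop p) ++ [c] := by
      rw [List.take_add_one, hgetm]
      rw [List.drop_append_of_le_length (by simp; omega)]
      simp
    have hmeml : ∀ c' ∈ (l.take (m + 1)).drop p, c' ∈ l := fun c' h =>
      List.mem_of_mem_take (List.mem_of_mem_drop h)
    have Hrem' : ∀ c', (rem.modify c 0 (· - 1)).getD c' 0 = (rest'.count c' : Int) := by
      intro c'
      rw [PySem.Dict.getD_modify]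
      by_cases h : c' = c
      · rw [if_pos h, Hrem, h]
        have hcc : (c :: rest').count c = rest'.count c + 1 := by simp
        rw [hcc]; push_cast; ring
      · have h2 : ¬ c = c' := fun he => h he.symm
        rw [if_neg h, Hrem]
        congr 1
        simp [h2]
    have hremc : (rem.modify c 0 (· - 1)).getD c 0 = (rest'.count c : Int) := Hrem' c
    -- the new pending set
    have Hpend' : ∀ c',
        (c' ∈ (if (rem.modify c 0 (· - 1)).getD c 0 > 0
                then PySem.Set.add pend c else PySem.Set.discard pend c)) ↔
        (c' ∈ (l.take (m + 1)).drop p ∧ 0 < rest'.count c') := by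
      intro c'
      rw [hremc]
      by_cases hcnt : 0 < rest'.count c
      · rw [if_pos (by exact_mod_cast hcnt), PySem.Set.mem_add]
        by_cases hc' : c' = c
        · rw [hc']; simp [hslice, hcnt]
        · have hc'' : ¬ c = c' := fun he => hc' he.symm
          simp only [hc', or_false]
          rw [Hpend c', hslice]
          simp [List.mem_append, hc', hc'']
      · rw [if_neg (by omega), PySem.Set.mem_discard]
        by_cases hc' : c' = c
        · rw [hc']
          simp only [ne_eq, not_true_eq_false, and_false, false_iff, not_and]
          intro _; omega
        · have hc'' : ¬ c = c' := fun he => hc' he.symm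
          simp only [ne_eq, hc', not_false_eq_true, and_true]
          rw [Hpend c', hslice]
          simp [List.mem_append, hc', hc'']
    have hcondA : ((m : Int) = max right ((lastDict l).getD c 0)) ↔
        (∀ c' ∈ (l.take (m + 1)).drop p, (lastDict l).getD c' 0 ≤ (m : Int)) := by
      constructor
      · intro h c' hc'
        have hmx := max_le_iff.1 (le_of_eq h.symm)
        rcases List.mem_append.1 (hslice ▸ hc') with hmem | hmem
        · exact ((Hr (m : Int)).1 hmx.1).2 c' hmem
        · simp at hmem; subst hmem; exact hmx.2
      · intro h
        have h1 : right ≤ (m : Int) := (Hr (m : Int)).2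
          ⟨by exact_mod_cast hpm,
           fun c' hc' => h c' (hslice ▸ List.mem_append_left _ hc')⟩
        have h2 : (lastDict l).getD c 0 ≤ (m : Int) :=
          h c (hslice ▸ List.mem_append_right _ (by simp))
        exact le_antisymm (le_trans hLc (le_max_right _ _)) (max_le h1 h2)
    have hcondB :
        (if (rem.modify c 0 (· - 1)).getD c 0 > 0
           then PySem.Set.add pend c else PySem.Set.discard pend c).isEmpty = true ↔
        (∀ c' ∈ (l.take (m + 1)).drop p, (lastDict l).getD c' 0 ≤ (m : Int)) := by
      rw [List.isEmpty_iff, List.eq_nil_iff_forall_not_mem]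
      constructor
      · intro h c' hc'
        have hnot : ¬ (c' ∈ (l.take (m + 1)).drop p ∧ 0 < rest'.count c') := by
          rw [← Hpend' c']; exact h c'
        have hcnt : rest'.count c' = 0 := by
          by_contra hposn
          exact hnot ⟨hc', by omega⟩
        have hb := L_bridge l c' (hmeml c' hc') m
        rw [hdrop'] at hb
        by_contra hgt
        have := hb.1 (by omega)
        omega
      · intro h c' hc'
        obtain ⟨hs, hcnt⟩ := (Hpend' c').1 hc'
        have hb := L_bridge l c' (hmeml c' hs) m
        rw [hdrop'] at hb
        have := hb.2 hcnt
        have := h c' hs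
        omega
    rw [PySem.List.enumerate_cons]
    simp only [List.foldl_cons]
    by_cases hcut : (m : Int) = max right ((lastDict l).getD c 0)
    · -- segment closes here in both programs
      have hBem : (if (rem.modify c 0 (· - 1)).getD c 0 > 0
           then PySem.Set.add pend c else PySem.Set.discard pend c).isEmpty = true :=
        hcondB.2 (hcondA.1 hcut)
      have hBnil : (if (rem.modify c 0 (· - 1)).getD c 0 > 0
           then PySem.Set.add pend c else PySem.Set.discard pend c) = [] :=
        List.isEmpty_iff.1 hBem
      have hA : stepA (lastDict l) (ans, (p : Int), right) ((m : Int), c)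
          = (ans ++ [(m : Int) - p + 1], (m : Int) + 1, (m : Int) + 1) := by
        simp only [stepA]
        rw [if_pos hcut, ← hcut]
      have hB : stepB (rem, pend, ans, ((m - p : Nat) : Int)) c
          = (rem.modify c 0 (· - 1), [], ans ++ [(m : Int) - p + 1], 0) := by
        simp only [stepB, hBnil]
        rw [if_pos (show ([] : List Char).isEmpty = true from rfl)]
        rw [Nat.cast_sub hpm]
      rw [hA, hB]
      have := ih (m + 1) (m + 1) (ans ++ [(m : Int) - p + 1]) ((m : Int) + 1)
        (rem.modify c 0 (· - 1)) []
        hdrop' (le_refl _)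
        (by
          intro i
          have hnil : (l.take (m + 1)).drop (m + 1) = [] :=
            List.drop_eq_nil_of_le (by simp)
          rw [hnil]
          push_cast
          simp)
        Hrem'
        (by intro c'; simp)
      simpa using this
    · -- segment continues in both programs
      have hBnem : ¬ ((if (rem.modify c 0 (· - 1)).getD c 0 > 0
           then PySem.Set.add pend c else PySem.Set.discard pend c).isEmpty = true) :=
        fun h => hcut (hcondA.2 (hcondB.1 h))
      have hA : stepA (lastDict l) (ans, (p : Int), right) ((m : Int), c)
          = (ans, (p : Int), max right ((lastDict l).getD c 0)) := by
        simp only [stepA]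
        rw [if_neg hcut]
      have hB : stepB (rem, pend, ans, ((m - p : Nat) : Int)) c
          = (rem.modify c 0 (· - 1),
             (if (rem.modify c 0 (· - 1)).getD c 0 > 0
                then PySem.Set.add pend c else PySem.Set.discard pend c),
             ans, ((m + 1 - p : Nat) : Int)) := by
        simp only [stepB]
        rw [if_neg hBnem]
        have : ((m - p : Nat) : Int) + 1 = ((m + 1 - p : Nat) : Int) := by
          rw [Nat.cast_sub hpm, Nat.cast_sub (by omega)]
          push_cast; ring
        rw [this]
      rw [hA, hB]
      have := ih (m + 1) p ans (max right ((lastDict l).getD c 0))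
        (rem.modify c 0 (· - 1))
        (if (rem.modify c 0 (· - 1)).getD c 0 > 0
           then PySem.Set.add pend c else PySem.Set.discard pend c)
        hdrop' (by omega)
        (by
          intro i
          rw [max_le_iff, Hr i, hslice]
          constructor
          · rintro ⟨⟨hpi, hall⟩, hlc⟩
            refine ⟨hpi, ?_⟩
            intro c' hc'
            rcases List.mem_append.1 hc' with hmem | hmem
            · exact hall c' hmem
            · simp at hmem; subst hmem; exact hlc
          · rintro ⟨hpi, hall⟩
            exact ⟨⟨hpi, fun c' hc' => hall c' (List.mem_append_left _ hc')⟩,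
                   hall c (List.mem_append_right _ (by simp))⟩)
        Hrem'
        Hpend'
      simpa using this

-- ===== VERDICT (by name: the statement is the Claim_ definition above) =====
theorem solve_spec : Claim_equal_solve := by
  intro s _
  unfold Spec_solve solve solve_alt
  have h := main_inv s.toList s.toList 0 0 [] 0 (cntDict s.toList) []
    rfl (le_refl 0)
    (by intro i; simp)
    (by
      intro c
      unfold cntDict
      rw [PySem.Dict.getD_foldl_insert_add_one]
      simp)
    (by intro c; simp)
  simpa using h
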